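-- pv_equiv track=rewrite | github.com/PascalVisser/BDC | Assignment1/assignment1.py | calc_quality_score
-- ===== SOURCE A (Python) =====
-- def calc_quality_score(quality):
--     """Calculates quality scores of the quality line"""
--     result = []
--     for quality_line in quality:
--         for item, checker in enumerate(quality_line):
--             try:
--                 result[item] += ord(checker) - 33
--             except IndexError:
--                 result.append(ord(checker) - 33)
--     return result
-- ===== SOURCE B (Python) =====
-- def calc_quality_score(quality):
--     """Calculates quality scores of the quality line (column-major)."""
--     width = max(map(len, quality), default=0)
--     return [sum(ord(line[j]) - 33 for line in quality if j < len(line))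
--             for j in range(width)]
-- ===== Notes on version B (the rewrite author's own statement) =====
-- stated objective: idiomatic
-- what changed: Column-major comprehension: compute the max line width once and sum each column directly, instead of A's row-major pass that grows the result list via try/except IndexError.
import Mathlib
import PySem

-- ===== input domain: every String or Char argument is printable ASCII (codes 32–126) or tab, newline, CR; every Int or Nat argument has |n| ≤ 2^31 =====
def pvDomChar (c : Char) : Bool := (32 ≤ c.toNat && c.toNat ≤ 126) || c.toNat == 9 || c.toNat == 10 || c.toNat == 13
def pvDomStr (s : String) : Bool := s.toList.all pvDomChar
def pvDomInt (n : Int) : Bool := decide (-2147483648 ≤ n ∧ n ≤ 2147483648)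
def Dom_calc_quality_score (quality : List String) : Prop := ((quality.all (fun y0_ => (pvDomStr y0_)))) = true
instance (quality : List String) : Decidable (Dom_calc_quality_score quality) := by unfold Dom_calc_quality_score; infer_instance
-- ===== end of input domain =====

-- B sums each column directly (column-major) instead of A's row-major try/except growth; same values, idiomatic decomposition.
-- ===== PORT A =====
-- inner loop over enumerate(quality_line): `k` is the enumerate counter; `result[item] += …`
-- raises IndexError exactly when item ≥ len(result), caught by the append branch (exact for the
-- nonnegative indices enumerate produces).
def pvInnerA (res : List Int) (k : Nat) : List Char → List Int
  | [] => res
  | c :: cs =>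
    if k < res.length then
      pvInnerA (res.set k (res.getD k 0 + ((c.toNat : Int) - 33))) (k + 1) cs
    else
      pvInnerA (res ++ [(c.toNat : Int) - 33]) (k + 1) cs

def calc_quality_score (quality : List String) : List Int :=
  quality.foldl (fun result quality_line => pvInnerA result 0 quality_line.toList) []

-- ===== PORT B =====
-- width = max(map(len, quality), default=0)
def pvWidth (quality : List String) : Nat :=
  quality.foldl (fun m line => max m line.toList.length) 0

-- sum(ord(line[j]) - 33 for line in quality if j < len(line))
def pvColSum (quality : List String) (j : Nat) : Int :=
  quality.foldl
    (fun s line =>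
      if j < line.toList.length then s + ((line.toList.getD j ' ').toNat : Int) - 33 else s) 0

def calc_quality_score_alt (quality : List String) : List Int :=
  (List.range (pvWidth quality)).map (pvColSum quality)

-- ===== PRECONDITION & SPEC =====
def Spec_calc_quality_score (quality : List String) (out : List Int) : Prop := out = calc_quality_score_alt quality
instance (quality : List String) (out : List Int) : Decidable (Spec_calc_quality_score quality out) := by unfold Spec_calc_quality_score; infer_instance

-- ===== CLAIM (what is proved, stated in full; the proofs are below) =====
def Claim_equal_calc_quality_score : Prop := ∀ (quality : List String), Dom_calc_quality_score quality → Spec_calc_quality_score quality (calc_quality_score quality)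

-- ===== LEMMAS AND PROOFS =====

-- ===== VERDICT (by name: the statement is the Claim_ definition above) =====
-- score of one character
def pvScore (c : Char) : Int := (c.toNat : Int) - 33

-- elementwise addition, keeping the overhang of the longer list
def pvMerge : List Int → List Int → List Int
  | res, [] => res
  | [], s :: ss => s :: ss
  | r :: rs, s :: ss => (r + s) :: pvMerge rs ss

theorem pvInnerA_shift (cs : List Char) (r : Int) (rs : List Int) (k : Nat) :
    pvInnerA (r :: rs) (k + 1) cs = r :: pvInnerA rs k cs := by
  induction cs generalizing r rs k with
  | nil => rfl
  | cons c cs ih =>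
    simp only [pvInnerA, List.length_cons, Nat.add_lt_add_iff_right, List.getD_cons_succ]
    split
    · rw [show (r :: rs).set (k + 1) (rs.getD k 0 + ((c.toNat : Int) - 33)) =
          r :: rs.set k (rs.getD k 0 + ((c.toNat : Int) - 33)) from rfl, ih]
    · rw [show (r :: rs) ++ [(c.toNat : Int) - 33] = r :: (rs ++ [(c.toNat : Int) - 33]) from rfl,
        ih]

theorem pvInnerA_merge (cs : List Char) (res : List Int) :
    pvInnerA res 0 cs = pvMerge res (cs.map pvScore) := by
  induction cs generalizing res with
  | nil => cases res <;> rfl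
  | cons c cs ih =>
    cases res with
    | nil =>
      simp only [pvInnerA, List.length_nil, Nat.not_lt_zero, if_false, List.nil_append,
        List.map_cons, pvMerge]
      rw [pvInnerA_shift, ih]
      cases cs.map pvScore <;> simp [pvScore, pvMerge]
    | cons r rs =>
      simp only [pvInnerA, List.length_cons, Nat.succ_pos, if_true, List.getD_cons_zero,
        List.set_cons_zero, List.map_cons, pvMerge]
      rw [pvInnerA_shift, ih]
      simp [pvScore]

theorem pvMerge_getD (res ss : List Int) (j : Nat) :
    (pvMerge res ss).getD j 0 = res.getD j 0 + ss.getD j 0 := by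
  induction res generalizing ss j with
  | nil => cases ss <;> simp [pvMerge]
  | cons r rs ih =>
    cases ss with
    | nil => simp [pvMerge]
    | cons s ss =>
      cases j with
      | zero => simp [pvMerge]
      | succ j => simpa [pvMerge] using ih ss j

theorem pvMerge_length (res ss : List Int) :
    (pvMerge res ss).length = max res.length ss.length := by
  induction res generalizing ss with
  | nil => cases ss <;> simp [pvMerge]
  | cons r rs ih =>
    cases ss with
    | nil => simp [pvMerge]
    | cons s ss => simp [pvMerge, ih]

theorem pvA_fold (quality : List String) :
    calc_quality_score quality =
      quality.foldl (fun res line => pvMerge res (line.toList.map pvScore)) [] := by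
  unfold calc_quality_score
  congr 1
  funext res line
  exact pvInnerA_merge _ _

theorem pvFold_length (quality : List String) (acc : List Int) :
    (quality.foldl (fun res line => pvMerge res (line.toList.map pvScore)) acc).length =
      quality.foldl (fun m line => max m line.toList.length) acc.length := by
  induction quality generalizing acc with
  | nil => rfl
  | cons line q ih =>
    simp only [List.foldl_cons]
    rw [ih, pvMerge_length]
    simp

theorem pvMap_score_getD (l : List Char) (j : Nat) :
    (l.map pvScore).getD j 0 = if j < l.length then ((l.getD j ' ').toNat : Int) - 33 else 0 := by
  by_cases h : j < l.length
  · simp [List.getD_eq_getElem?_getD, h, pvScore]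
  · simp [List.getD_eq_getElem?_getD, h]

theorem pvFold_getD (quality : List String) (acc : List Int) (j : Nat) :
    (quality.foldl (fun res line => pvMerge res (line.toList.map pvScore)) acc).getD j 0 =
      quality.foldl
        (fun s line =>
          if j < line.toList.length then s + ((line.toList.getD j ' ').toNat : Int) - 33 else s)
        (acc.getD j 0) := by
  induction quality generalizing acc with
  | nil => rfl
  | cons line q ih =>
    simp only [List.foldl_cons]
    rw [ih, pvMerge_getD, pvMap_score_getD]
    split <;> ring_nf

theorem calc_quality_score_spec : Claim_equal_calc_quality_score := by
  intro quality _
  show calc_quality_score quality = calc_quality_score_alt quality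
  rw [pvA_fold]
  have hlen : (quality.foldl (fun res line => pvMerge res (line.toList.map pvScore)) []).length =
      pvWidth quality := by
    simpa [pvWidth] using pvFold_length quality []
  apply List.ext_getElem
  · simp [calc_quality_score_alt, hlen]
  · intro i h1 h2
    have hi : i < pvWidth quality := by rw [← hlen]; exact h1
    have hL : (quality.foldl (fun res line => pvMerge res (line.toList.map pvScore)) [])[i] =
        (quality.foldl (fun res line => pvMerge res (line.toList.map pvScore)) []).getD i 0 :=
      (List.getD_eq_getElem _ 0 h1).symm
    rw [hL, pvFold_getD]
    simp [calc_quality_score_alt, pvColSum]
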